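-- pv_equiv track=rewrite | github.com/Roohiya/adventOfCode2019 | day4/secure_container_2.py | check_adjacent_chars
-- ===== SOURCE A (Python) =====
-- def check_adjacent_chars (num):
--   point = 1
--
--   count = 1
--
--   while point < len(num):
--     if (num[point] == num[point-1]):
--       count += 1
--     else:
--       if (count == 2):
--         return True
--       count = 1
--     point += 1
--
--   if (count == 2):
--     return True
--   return False
-- ===== SOURCE B (Python) =====
-- def check_adjacent_chars(num):
--   # Build the list of maximal runs of equal adjacent characters first
--   # (a groupby-style decomposition), then check whether any run has length 2.
--   runs = []
--   for ch in num:
--     if runs and runs[-1][0] == ch: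
--       runs[-1] = (ch, runs[-1][1] + 1)
--     else:
--       runs.append((ch, 1))
--   return any(n == 2 for _, n in runs)
-- ===== Notes on version B (the rewrite author's own statement) =====
-- stated objective: idiomatic
-- what changed: B first materialises the maximal runs of equal adjacent characters (groupby-style) and then checks any run length equals 2, instead of A's single pass with a manual counter, an early return on character change, and a trailing post-loop check.
import Mathlib
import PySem

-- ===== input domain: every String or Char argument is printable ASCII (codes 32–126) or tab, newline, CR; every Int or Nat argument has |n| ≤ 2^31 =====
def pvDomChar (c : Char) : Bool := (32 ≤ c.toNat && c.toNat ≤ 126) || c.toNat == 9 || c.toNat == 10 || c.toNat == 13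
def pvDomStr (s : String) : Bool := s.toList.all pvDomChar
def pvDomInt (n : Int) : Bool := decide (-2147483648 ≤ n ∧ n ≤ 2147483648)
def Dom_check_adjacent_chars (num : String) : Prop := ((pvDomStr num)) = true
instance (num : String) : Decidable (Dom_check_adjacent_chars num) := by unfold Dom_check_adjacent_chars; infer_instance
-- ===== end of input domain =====

-- B rebuilds the answer from the list of maximal equal-adjacent runs (groupby-style)
-- instead of A's single counter scan with early returns; same cost, more declarative.

-- ===== PORT A =====
-- A's while loop over indices, transliterated as recursion over the remaining
-- characters with the previous character and the running count as state.
def checkLoopA : Char → Nat → List Char → Bool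
  | _, count, [] => count == 2                     -- trailing 'if count == 2' after the loop
  | prev, count, c :: rest =>
    if c == prev then checkLoopA c (count + 1) rest
    else if count == 2 then true
    else checkLoopA c 1 rest

def check_adjacent_chars (num : String) : Bool :=
  match num.toList with
  | [] => (1 == 2 : Bool)                          -- loop never runs; count stays 1
  | c :: rest => checkLoopA c 1 rest

-- ===== PORT B =====
-- one step of B's run-building loop: extend the last run or start a new one
def stepB (runs : List (Char × Nat)) (ch : Char) : List (Char × Nat) :=
  match runs.getLast? with
  | some (c, n) => if c == ch then runs.dropLast ++ [(ch, n + 1)] else runs ++ [(ch, 1)]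
  | none => [(ch, 1)]

def check_adjacent_chars_alt (num : String) : Bool :=
  (num.toList.foldl stepB []).any (fun p => p.2 == 2)

-- ===== PRECONDITION & SPEC =====
def Spec_check_adjacent_chars (num : String) (out : Bool) : Prop := out = check_adjacent_chars_alt num
instance (num : String) (out : Bool) : Decidable (Spec_check_adjacent_chars num out) := by unfold Spec_check_adjacent_chars; infer_instance

-- ===== CLAIM (what is proved, stated in full; the proofs are below) =====
def Claim_equal_check_adjacent_chars : Prop := ∀ (num : String), Dom_check_adjacent_chars num → Spec_check_adjacent_chars num (check_adjacent_chars num)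

-- ===== LEMMAS AND PROOFS =====

-- proof-side description of the run list B's fold produces from state [(c, n)]
def toRuns : Char → Nat → List Char → List (Char × Nat)
  | c, n, [] => [(c, n)]
  | c, n, d :: rest => if c == d then toRuns d (n + 1) rest else (c, n) :: toRuns d 1 rest

theorem foldl_stepB_toRuns (l : List Char) : ∀ (c : Char) (n : Nat) (acc : List (Char × Nat)),
    List.foldl stepB (acc ++ [(c, n)]) l = acc ++ toRuns c n l := by
  induction l with
  | nil => intro c n acc; simp [toRuns]
  | cons d rest ih =>
    intro c n acc
    have hstep : stepB (acc ++ [(c, n)]) d =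
        if c == d then acc ++ [(d, n + 1)] else (acc ++ [(c, n)]) ++ [(d, 1)] := by
      simp [stepB]
    simp only [List.foldl, hstep, toRuns]
    by_cases h : c == d
    · simp only [h, if_true]
      exact ih d (n + 1) acc
    · simp only [h, Bool.false_eq_true, if_false]
      rw [ih d 1 (acc ++ [(c, n)])]
      simp

theorem checkLoopA_toRuns (l : List Char) : ∀ (c : Char) (n : Nat),
    checkLoopA c n l = (toRuns c n l).any (fun p => p.2 == 2) := by
  induction l with
  | nil => intro c n; simp [checkLoopA, toRuns]
  | cons d rest ih =>
    intro c n
    simp only [checkLoopA, toRuns]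
    have hsym : (d == c) = (c == d) := by
      by_cases h : c = d <;> simp [h, Ne.symm]
    rw [hsym]
    by_cases h : c == d
    · simp [h, ih]
    · by_cases h2 : n = 2 <;> simp [h, h2, ih]

-- ===== VERDICT (by name: the statement is the Claim_ definition above) =====
theorem check_adjacent_chars_spec : Claim_equal_check_adjacent_chars := by
  intro num _
  unfold Spec_check_adjacent_chars check_adjacent_chars check_adjacent_chars_alt
  cases h : num.toList with
  | nil => simp
  | cons c rest =>
    simp only [List.foldl, stepB, List.getLast?_nil]
    have := foldl_stepB_toRuns (acc := []) (c := c) (n := 1) rest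
    simp only [List.nil_append] at this
    rw [this, checkLoopA_toRuns]
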